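-- pv_equiv track=rewrite | github.com/RamananVr/Leetcodepython | hash_table_sorting/1418_unknown_title.py | displayTable
-- ===== SOURCE A (Python) =====
-- from collections import defaultdict
--
-- def displayTable(orders):
--     # Step 1: Extract all unique food items and sort them lexicographically
--     food_items = sorted({order[2] for order in orders})
--
--     # Step 2: Create a mapping of table numbers to food item counts
--     table_food_count = defaultdict(lambda: defaultdict(int))
--     for _, table, food in orders:
--         table_food_count[int(table)][food] += 1
--
--     # Step 3: Sort table numbers numerically
--     sorted_tables = sorted(table_food_count.keys())
--
--     # Step 4: Build the display table
--     header = ["Table"] + food_items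
--     display_table = [header]
--
--     for table in sorted_tables:
--         row = [str(table)] + [str(table_food_count[table][food]) for food in food_items]
--         display_table.append(row)
--
--     return display_table
-- ===== SOURCE B (Python) =====
-- def displayTable(orders):
--     foods = sorted({o[2] for o in orders})
--     tables = sorted({int(o[1]) for o in orders})
--     rows = [["Table"] + foods]
--     for t in tables:
--         row = [str(t)]
--         for f in foods:
--             c = 0
--             for o in orders:
--                 if int(o[1]) == t and o[2] == f:
--                     c += 1
--             row.append(str(c))
--         rows.append(row)
--     return rows
-- ===== Notes on version B (the rewrite author's own statement) =====
-- stated objective: alternative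
-- what changed: Removes A's nested count-dictionary entirely: B computes each cell of the grid by a direct scan of the orders list (naive per-cell counting over sorted distinct tables and foods), building no aggregation structure at all.
import Mathlib
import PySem

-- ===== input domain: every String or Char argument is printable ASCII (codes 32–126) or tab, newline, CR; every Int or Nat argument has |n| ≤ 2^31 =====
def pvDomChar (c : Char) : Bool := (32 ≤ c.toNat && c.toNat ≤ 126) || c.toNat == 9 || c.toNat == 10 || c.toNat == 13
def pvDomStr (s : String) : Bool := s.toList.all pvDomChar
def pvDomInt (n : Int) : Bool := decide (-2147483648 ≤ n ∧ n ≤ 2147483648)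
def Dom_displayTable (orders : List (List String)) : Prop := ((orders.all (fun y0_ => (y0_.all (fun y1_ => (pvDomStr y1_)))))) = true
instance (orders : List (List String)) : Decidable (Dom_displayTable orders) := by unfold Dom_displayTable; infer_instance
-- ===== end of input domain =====

-- B removes A's nested count-dictionary entirely: it computes each cell by a direct scan of the
-- orders list (naive per-cell counting over the sorted distinct tables and foods); alternative, same results, no aggregation structure.

-- int(order[1]) (Pre_ guarantees the string parses, so the default is never used inside Pre_)
def pvTbl (o : List String) : Int := (PySem.Int.ofStr? (o.getD 1 "")).getD 0
-- order[2] (Pre_ guarantees length 3)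
def pvFood (o : List String) : String := o.getD 2 ""

-- ===== PORT A =====
def displayTable (orders : List (List String)) : List (List String) :=
  let foodItems := PySem.List.sorted (PySem.Set.ofList (orders.map pvFood)) (fun x => x) false
  let tfc : PySem.Dict Int (PySem.Dict String Int) :=
    orders.foldl (fun d o =>
      d.insert (pvTbl o) ((d.getD (pvTbl o) PySem.Dict.empty).modify (pvFood o) 0 (· + 1)))
      PySem.Dict.empty
  let sortedTables := PySem.List.sorted tfc.keys (fun x => x) false
  let header := "Table" :: foodItems
  sortedTables.foldl (fun disp t =>
    disp ++ [PySem.Int.toStr t ::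
      foodItems.map (fun f => PySem.Int.toStr ((tfc.getD t PySem.Dict.empty).getD f 0))])
    [header]

-- ===== PORT B =====
def displayTable_alt (orders : List (List String)) : List (List String) :=
  let foods := PySem.List.sorted (PySem.Set.ofList (orders.map pvFood)) (fun x => x) false
  let tables := PySem.List.sorted (PySem.Set.ofList (orders.map pvTbl)) (fun x => x) false
  tables.foldl (fun rows t =>
    rows ++ [foods.foldl (fun row f =>
        row ++ [PySem.Int.toStr (orders.foldl (fun c o =>
          if pvTbl o == t && pvFood o == f then c + 1 else c) (0 : Int))])
      [PySem.Int.toStr t]])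
    [("Table" :: foods)]

-- ===== PRECONDITION & SPEC =====
-- Pre_ excludes exactly the inputs where the Python A raises: an order that is not a 3-list
-- (IndexError/ValueError on unpacking) or whose second field int() rejects (ValueError).
def Pre_displayTable (orders : List (List String)) : Prop :=
  ∀ o ∈ orders, o.length = 3 ∧ (PySem.Int.ofStr? (o.getD 1 "")).isSome = true
instance (orders : List (List String)) : Decidable (Pre_displayTable orders) := by
  unfold Pre_displayTable; infer_instance
def pvWitness_displayTable : List (List String) :=
  [["alice", "3", "tea"], ["bob", "1", "pie"], ["carl", "3", "tea"]]
def Spec_displayTable (orders : List (List String)) (out : List (List String)) : Prop := out = displayTable_alt orders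
instance (orders : List (List String)) (out : List (List String)) : Decidable (Spec_displayTable orders out) := by unfold Spec_displayTable; infer_instance

-- ===== CLAIM (what is proved, stated in full; the proofs are below) =====
def Claim_equal_displayTable : Prop := ∀ (orders : List (List String)), Dom_displayTable orders → Pre_displayTable orders → Spec_displayTable orders (displayTable orders)

-- ===== LEMMAS AND PROOFS =====

-- the count stored in A's nested dict is the count of the (table, food) pair over the processed orders
lemma pvNested_getD (l : List (List String)) (d : PySem.Dict Int (PySem.Dict String Int))
    (t : Int) (f : String) :
    (((l.foldl (fun d o =>
        d.insert (pvTbl o) ((d.getD (pvTbl o) PySem.Dict.empty).modify (pvFood o) 0 (· + 1))) d)).getD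
        t PySem.Dict.empty).getD f 0
      = (d.getD t PySem.Dict.empty).getD f 0
        + ((l.map (fun o => (pvTbl o, pvFood o))).count (t, f) : Int) := by
  induction l generalizing d with
  | nil => simp
  | cons o l ih =>
    simp only [List.foldl_cons, List.map_cons, ih, List.count_cons]
    rw [PySem.Dict.getD_insert]
    by_cases ht : t = pvTbl o
    · rw [if_pos ht]; subst ht
      rw [PySem.Dict.getD_modify]
      by_cases hf : f = pvFood o
      · subst hf; simp; ring
      · rw [if_neg hf]
        simp [Prod.ext_iff]
        exact fun h => hf h.symm
    · rw [if_neg ht]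
      simp [Prod.ext_iff]
      exact fun h => absurd h.symm ht

-- the keys of A's nested dict are exactly the set of table numbers, in first-occurrence order
lemma pvKeys_eq (orders : List (List String)) :
    (orders.foldl (fun d o =>
      d.insert (pvTbl o) ((d.getD (pvTbl o) PySem.Dict.empty).modify (pvFood o) 0 (· + 1)))
      (PySem.Dict.empty : PySem.Dict Int (PySem.Dict String Int))).keys
      = PySem.Set.ofList (orders.map pvTbl) := by
  rw [PySem.Dict.keys_foldl_insert_key]
  simp [PySem.Set.update, PySem.Set.ofList_eq_foldl, PySem.Dict.keys_empty]

-- B's innermost scan of the orders counts exactly the (table, food) pair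
lemma pvScan_count (orders : List (List String)) (t : Int) (f : String) :
    orders.foldl (fun c o => if pvTbl o == t && pvFood o == f then c + 1 else c) (0 : Int)
      = ((orders.map (fun o => (pvTbl o, pvFood o))).count (t, f) : Int) := by
  rw [PySem.List.foldl_if_add_one]
  simp only [List.count, List.countP_map, Function.comp_def, zero_add]
  norm_cast

-- ===== VERDICT (by name: the statement is the Claim_ definition above) =====
theorem displayTable_spec : Claim_equal_displayTable := by
  intro orders _ _
  unfold Spec_displayTable displayTable displayTable_alt
  rw [PySem.List.foldl_append_singleton_eq_map, PySem.List.foldl_append_singleton_eq_map, pvKeys_eq]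
  rw [List.singleton_append, List.singleton_append]
  congr 1
  apply List.map_congr_left
  intro t _
  rw [PySem.List.foldl_append_singleton_eq_map, List.singleton_append]
  congr 1
  apply List.map_congr_left
  intro f _
  rw [pvNested_getD, pvScan_count]
  simp
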